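-- pv_equiv track=rewrite | github.com/estomagordo/advent_of_code_2015 | 3b.py | solve
-- ===== SOURCE A (Python) =====
-- def solve(moves):
--     positions = [[0, 0], [0, 0]]
--     visited = set([(0, 0)])
--     robot = False
--
--     for move in moves:
--         if move == '>':
--             positions[robot][1] += 1
--         elif move == '<':
--             positions[robot][1] -= 1
--         elif move == '^':
--             positions[robot][0] -= 1
--         elif move == 'v':
--             positions[robot][0] += 1
--
--         visited.add(tuple(positions[robot]))
--         robot = not robot
--
--     return len(visited)
-- ===== SOURCE B (Python) =====
-- def solve(moves):
--     santa_moves = moves[0::2]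
--     robo_moves = moves[1::2]
--     visited = {(0, 0)}
--     for stream in (santa_moves, robo_moves):
--         r = c = 0
--         for move in stream:
--             if move == '>':
--                 c += 1
--             elif move == '<':
--                 c -= 1
--             elif move == '^':
--                 r -= 1
--             elif move == 'v':
--                 r += 1
--             visited.add((r, c))
--     return len(visited)
-- ===== Notes on version B (the rewrite author's own statement) =====
-- stated objective: alternative
-- what changed: Replaces the single interleaved loop with a toggle flag and a pair of mutable positions by a parity split of the move string into the two Santas' streams, each walked independently with one position into a shared visited set.
import Mathlib
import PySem

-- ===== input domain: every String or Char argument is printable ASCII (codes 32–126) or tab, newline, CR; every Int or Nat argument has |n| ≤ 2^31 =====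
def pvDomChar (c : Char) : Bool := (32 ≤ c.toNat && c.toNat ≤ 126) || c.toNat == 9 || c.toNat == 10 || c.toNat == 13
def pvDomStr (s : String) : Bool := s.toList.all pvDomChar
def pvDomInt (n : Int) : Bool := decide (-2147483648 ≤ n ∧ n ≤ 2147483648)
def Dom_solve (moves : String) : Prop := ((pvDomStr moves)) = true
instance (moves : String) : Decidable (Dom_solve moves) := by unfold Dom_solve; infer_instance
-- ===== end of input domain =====

-- B replaces A's interleaved toggle-flag loop by a parity split into two independent walks over a shared visited set (alternative decomposition, same cost).


-- ===== PORT A =====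
-- state = (positions (index False/0, index True/1), robot, visited)
def solveStep (st : ((Int × Int) × (Int × Int)) × Bool × PySem.Set (Int × Int)) (move : Char) :
    ((Int × Int) × (Int × Int)) × Bool × PySem.Set (Int × Int) :=
  let positions := st.1
  let robot := st.2.1
  let visited := st.2.2
  let p := if robot then positions.2 else positions.1
  let p' :=
    if move = '>' then (p.1, p.2 + 1)
    else if move = '<' then (p.1, p.2 - 1)
    else if move = '^' then (p.1 - 1, p.2)
    else if move = 'v' then (p.1 + 1, p.2)
    else p
  let positions' := if robot then (positions.1, p') else (p', positions.2)
  (positions', !robot, PySem.Set.add visited p')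

def solve (moves : String) : Int :=
  let st := moves.toList.foldl solveStep ((((0 : Int), (0 : Int)), ((0 : Int), (0 : Int))), false,
    PySem.Set.ofList [(((0 : Int), (0 : Int)))])
  PySem.Set.len st.2.2

-- ===== PORT B =====
-- moves[0::2] / moves[1::2]: PySem.List.slice has no step argument, so the extended
-- slice is ported by hand as a parity split (exact: the characters at even resp. odd
-- indices, in order).
mutual
def pvEvery2 : List Char → List Char
  | [] => []
  | c :: cs => c :: pvEvery2Skip cs
def pvEvery2Skip : List Char → List Char
  | [] => []
  | _ :: cs => pvEvery2 cs
end

def altStep (p : Int × Int) (move : Char) : Int × Int :=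
  if move = '>' then (p.1, p.2 + 1)
  else if move = '<' then (p.1, p.2 - 1)
  else if move = '^' then (p.1 - 1, p.2)
  else if move = 'v' then (p.1 + 1, p.2)
  else p

def altWalk (s : PySem.Set (Int × Int)) (p : Int × Int) : List Char → PySem.Set (Int × Int)
  | [] => s
  | c :: cs => altWalk (PySem.Set.add s (altStep p c)) (altStep p c) cs

def solve_alt (moves : String) : Int :=
  let santa := pvEvery2 moves.toList
  let robo := pvEvery2Skip moves.toList
  let v := altWalk (altWalk (PySem.Set.ofList [(((0 : Int), (0 : Int)))]) (0, 0) santa) (0, 0) robo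
  PySem.Set.len v

-- ===== PRECONDITION & SPEC =====
def Spec_solve (moves : String) (out : Int) : Prop := out = solve_alt moves
instance (moves : String) (out : Int) : Decidable (Spec_solve moves out) := by unfold Spec_solve; infer_instance

-- ===== CLAIM (what is proved, stated in full; the proofs are below) =====
def Claim_equal_solve : Prop := ∀ (moves : String), Dom_solve moves → Spec_solve moves (solve moves)

-- ===== LEMMAS AND PROOFS =====

-- positions visited along a walk (one per character, moves or not)
def pvTrail (p : Int × Int) : List Char → List (Int × Int)
  | [] => []
  | c :: cs => altStep p c :: pvTrail (altStep p c) cs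

theorem mem_altWalk (l : List Char) : ∀ (s : PySem.Set (Int × Int)) (p x),
    x ∈ altWalk s p l ↔ x ∈ s ∨ x ∈ pvTrail p l := by
  induction l with
  | nil => intro s p x; simp [altWalk, pvTrail]
  | cons c cs ih =>
    intro s p x
    simp [altWalk, pvTrail, ih, PySem.Set.mem_add]
    tauto

theorem nodup_altWalk (l : List Char) : ∀ (s : PySem.Set (Int × Int)) (p),
    s.Nodup → (altWalk s p l).Nodup := by
  induction l with
  | nil => intro s p h; exact h
  | cons c cs ih => intro s p h; exact ih _ _ (PySem.Set.nodup_add _ _ h)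

theorem mem_foldA (l : List Char) : ∀ (p0 p1 : Int × Int) (b : Bool)
    (s : PySem.Set (Int × Int)) (x : Int × Int),
    x ∈ (l.foldl solveStep ((p0, p1), b, s)).2.2 ↔
      x ∈ s ∨ x ∈ pvTrail (if b then p1 else p0) (pvEvery2 l)
            ∨ x ∈ pvTrail (if b then p0 else p1) (pvEvery2Skip l) := by
  induction l with
  | nil => intro p0 p1 b s x; cases b <;> simp [pvEvery2, pvEvery2Skip, pvTrail]
  | cons c cs ih =>
    intro p0 p1 b s x
    cases b
    · rw [List.foldl_cons,
        show solveStep ((p0, p1), false, s) c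
            = ((altStep p0 c, p1), true, PySem.Set.add s (altStep p0 c)) from rfl,
        ih]
      simp only [pvEvery2, pvEvery2Skip, pvTrail, PySem.Set.mem_add, List.mem_cons,
        if_true, Bool.false_eq_true, if_false]
      tauto
    · rw [List.foldl_cons,
        show solveStep ((p0, p1), true, s) c
            = ((p0, altStep p1 c), false, PySem.Set.add s (altStep p1 c)) from rfl,
        ih]
      simp only [pvEvery2, pvEvery2Skip, pvTrail, PySem.Set.mem_add, List.mem_cons,
        if_true, Bool.false_eq_true, if_false]
      tauto

theorem nodup_foldA (l : List Char) :
    ∀ (st : ((Int × Int) × (Int × Int)) × Bool × PySem.Set (Int × Int)),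
    st.2.2.Nodup → (l.foldl solveStep st).2.2.Nodup := by
  induction l with
  | nil => intro st h; exact h
  | cons c cs ih => intro st h; exact ih _ (PySem.Set.nodup_add _ _ h)

-- ===== VERDICT (by name: the statement is the Claim_ definition above) =====
theorem solve_spec : Claim_equal_solve := by
  intro moves _
  unfold Spec_solve solve solve_alt
  have hA : ((moves.toList.foldl solveStep ((((0 : Int), (0 : Int)), ((0 : Int), (0 : Int))), false,
      PySem.Set.ofList [(((0 : Int), (0 : Int)))])).2.2).Nodup :=
    nodup_foldA _ _ (PySem.Set.nodup_ofList _)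
  have hB : (altWalk (altWalk (PySem.Set.ofList [(((0 : Int), (0 : Int)))]) (0, 0)
      (pvEvery2 moves.toList)) (0, 0) (pvEvery2Skip moves.toList)).Nodup :=
    nodup_altWalk _ _ _ (nodup_altWalk _ _ _ (PySem.Set.nodup_ofList _))
  have hmem : ∀ x, x ∈ (moves.toList.foldl solveStep ((((0 : Int), (0 : Int)), ((0 : Int), (0 : Int))), false,
      PySem.Set.ofList [(((0 : Int), (0 : Int)))])).2.2 ↔
      x ∈ altWalk (altWalk (PySem.Set.ofList [(((0 : Int), (0 : Int)))]) (0, 0)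
        (pvEvery2 moves.toList)) (0, 0) (pvEvery2Skip moves.toList) := by
    intro x
    rw [mem_foldA, mem_altWalk, mem_altWalk]
    simp only [Bool.false_eq_true, if_false]
    tauto
  have hperm := (List.perm_ext_iff_of_nodup hA hB).mpr hmem
  simp only [PySem.Set.len]
  exact_mod_cast hperm.length_eq
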